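-- pv_equiv track=rewrite | github.com/vkvang44/TheDailyAlgo | questions/utils.py | get_test_output
-- ===== SOURCE A (Python) =====
-- def get_test_output(outputs_arr):
--     # get test output
--     t = False
--     temp = []
--     test_output = []
--     for word in outputs_arr:
--         if word == "RESULT:":
--             t = True
--             continue
--         elif word == "STDOUT:":
--             t = False
--             if temp:
--                 test_output.append(temp)
--                 temp = []
--         if t == True:
--             temp.append(word)
--     test_output.append(temp)
--     return test_output
-- ===== SOURCE B (Python) =====
-- def _collect(chunk):
--     # tokens after the first "RESULT:", with any further "RESULT:" tokens dropped
--     try: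
--         i = chunk.index("RESULT:")
--     except ValueError:
--         return []
--     return [w for w in chunk[i + 1:] if w != "RESULT:"]
--
--
-- def get_test_output(outputs_arr):
--     # split on "STDOUT:" markers, then collect each chunk independently
--     chunks = []
--     cur = []
--     for w in outputs_arr:
--         if w == "STDOUT:":
--             chunks.append(cur)
--             cur = []
--         else:
--             cur.append(w)
--     res = [g for g in (_collect(c) for c in chunks) if g]
--     res.append(_collect(cur))
--     return res
-- ===== Notes on version B (the rewrite author's own statement) =====
-- stated objective: alternative
-- what changed: Replaces A's single-pass flag-and-buffer state machine with a split-then-collect decomposition: the input is first split into chunks on every "STDOUT:" token, then each chunk is independently reduced (index of its first "RESULT:" plus a filtered tail slice), non-empty groups of the non-final chunks and the final chunk's group unconditionally forming the result.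
import Mathlib
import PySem

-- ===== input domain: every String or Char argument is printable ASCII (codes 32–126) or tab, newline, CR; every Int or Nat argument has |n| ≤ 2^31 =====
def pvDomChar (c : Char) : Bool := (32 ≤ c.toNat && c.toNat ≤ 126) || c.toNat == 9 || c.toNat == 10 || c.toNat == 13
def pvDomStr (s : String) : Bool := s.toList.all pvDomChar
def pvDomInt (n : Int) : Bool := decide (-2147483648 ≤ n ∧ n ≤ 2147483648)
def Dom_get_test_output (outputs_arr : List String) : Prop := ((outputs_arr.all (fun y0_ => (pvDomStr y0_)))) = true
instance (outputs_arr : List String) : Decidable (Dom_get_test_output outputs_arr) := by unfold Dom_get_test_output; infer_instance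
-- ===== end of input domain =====

-- B replaces A's streaming flag-based state machine by split-on-"STDOUT:" chunks
-- processed independently (index of first "RESULT:" + a filtered slice): an
-- alternative decomposition of the same grouping, not claimed faster.


-- ===== PORT A =====
-- one iteration of A's for-loop over state (t, temp, test_output)
def aStep (st : Bool × List String × List (List String)) (word : String) :
    Bool × List String × List (List String) :=
  let (t, temp, out) := st
  if word = "RESULT:" then (true, temp, out)          -- t = True; continue
  else
    let (t, temp, out) :=
      if word = "STDOUT:" then
        if temp ≠ [] then (false, ([] : List String), out ++ [temp])
        else (false, temp, out)
      else (t, temp, out)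
    if t = true then (t, temp ++ [word], out) else (t, temp, out)

def get_test_output (outputs_arr : List String) : List (List String) :=
  let (_, temp, out) := outputs_arr.foldl aStep (false, [], [])
  out ++ [temp]

-- ===== PORT B =====
-- _collect: tokens after the first "RESULT:" of the chunk, further "RESULT:" dropped
def bCollect (chunk : List String) : List String :=
  match PySem.List.index? chunk "RESULT:" with
  | none => []
  | some i => (PySem.List.slice chunk (some ((i : Int) + 1)) none).filter (· ≠ "RESULT:")

-- one iteration of B's splitting loop over state (chunks, cur)
def bStep (st : List (List String) × List String) (w : String) :
    List (List String) × List String :=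
  if w = "STDOUT:" then (st.1 ++ [st.2], []) else (st.1, st.2 ++ [w])

def get_test_output_alt (outputs_arr : List String) : List (List String) :=
  let (chunks, cur) := outputs_arr.foldl bStep ([], [])
  ((chunks.map bCollect).filter (· ≠ [])) ++ [bCollect cur]

-- ===== PRECONDITION & SPEC =====
def Spec_get_test_output (outputs_arr : List String) (out : List (List String)) : Prop := out = get_test_output_alt outputs_arr
instance (outputs_arr : List String) (out : List (List String)) : Decidable (Spec_get_test_output outputs_arr out) := by unfold Spec_get_test_output; infer_instance

-- ===== CLAIM (what is proved, stated in full; the proofs are below) =====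
def Claim_equal_get_test_output : Prop := ∀ (outputs_arr : List String), Dom_get_test_output outputs_arr → Spec_get_test_output outputs_arr (get_test_output outputs_arr)

-- ===== LEMMAS AND PROOFS =====

-- A's loop as a structural recursion: fA t temp ws = (final t, final temp, flushed groups)
def fA (t : Bool) (temp : List String) : List String → Bool × List String × List (List String)
  | [] => (t, temp, [])
  | w :: ws =>
    if w = "RESULT:" then fA true temp ws
    else if w = "STDOUT:" then
      if temp ≠ [] then
        let r := fA false [] ws
        (r.1, r.2.1, temp :: r.2.2)
      else fA false [] ws
    else if t = true then fA t (temp ++ [w]) ws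
    else fA t temp ws

theorem foldl_aStep (ws : List String) : ∀ (t : Bool) (temp : List String) (out : List (List String)),
    ws.foldl aStep (t, temp, out) =
      ((fA t temp ws).1, (fA t temp ws).2.1, out ++ (fA t temp ws).2.2) := by
  induction ws with
  | nil => intro t temp out; simp [fA]
  | cons w ws ih =>
    intro t temp out
    simp only [List.foldl_cons, aStep, fA]
    by_cases h1 : w = "RESULT:"
    · simp [h1, ih]
    · by_cases h2 : w = "STDOUT:"
      · by_cases h3 : temp = []
        · simp [h2, h3, ih]
        · simp [h2, h3, ih]
      · cases t with
        | false => simp [h1, h2, ih]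
        | true => simp [h1, h2, ih]

-- B's splitting loop as a structural recursion: sp cur ws = (chunks, final cur)
def sp (cur : List String) : List String → List (List String) × List String
  | [] => ([], cur)
  | w :: ws =>
    if w = "STDOUT:" then
      let r := sp [] ws
      (cur :: r.1, r.2)
    else sp (cur ++ [w]) ws

theorem foldl_bStep (ws : List String) : ∀ (cs : List (List String)) (cur : List String),
    ws.foldl bStep (cs, cur) = (cs ++ (sp cur ws).1, (sp cur ws).2) := by
  induction ws with
  | nil => intro cs cur; simp [sp]
  | cons w ws ih =>
    intro cs cur
    simp only [List.foldl_cons, bStep, sp]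
    by_cases h : w = "STDOUT:"
    · simp [h, ih]
    · simp [h, ih]

-- prepending a non-"STDOUT:" word goes into the first chunk
theorem sp_cons_ne (w : String) (hw : w ≠ "STDOUT:") (cur : List String) (ws : List String) :
    sp cur (w :: ws) = sp (cur ++ [w]) ws := by
  simp [sp, hw]

-- bCollect characterisation
theorem bCollect_nil : bCollect [] = [] := by decide

theorem bCollect_result (c : List String) :
    bCollect ("RESULT:" :: c) = c.filter (· ≠ "RESULT:") := by
  unfold bCollect
  rw [PySem.List.index?_cons_self]
  norm_num [PySem.List.slice_from_one]

theorem bCollect_cons_ne (w : String) (hw : w ≠ "RESULT:") (c : List String) :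
    bCollect (w :: c) = bCollect c := by
  unfold bCollect
  rw [PySem.List.index?_cons_of_ne (x := w) (v := "RESULT:") (xs := c) hw]
  cases hidx : PySem.List.index? c "RESULT:" with
  | none => rfl
  | some i =>
    simp only [Option.map_some]
    rw [show ((i + 1 : Nat) : Int) + 1 = ((i + 2 : Nat) : Int) by push_cast; ring,
        show ((i : Nat) : Int) + 1 = ((i + 1 : Nat) : Int) by push_cast; ring]
    rw [PySem.List.slice_from_natCast, PySem.List.slice_from_natCast]
    rw [show i + 2 = i + 1 + 1 from rfl, List.drop_succ_cons]

-- collecting the first chunk when the flag is t and the buffer is temp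
def collP (t : Bool) (temp : List String) (c : List String) : List String :=
  if t then temp ++ c.filter (· ≠ "RESULT:") else bCollect c

-- assembling B's result when the first chunk is to be collected with collP t temp
def mix (t : Bool) (temp : List String) : List (List String) × List String → List (List String)
  | ([], cur) => [collP t temp cur]
  | (c :: rest, cur) =>
      ((collP t temp c :: rest.map bCollect).filter (· ≠ [])) ++ [bCollect cur]

theorem mix_false_nil (p : List (List String) × List String) :
    mix false [] p = ((p.1.map bCollect).filter (· ≠ [])) ++ [bCollect p.2] := by
  obtain ⟨cs, cur⟩ := p
  cases cs <;> simp [mix, collP]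

theorem collP_result (t : Bool) (temp : List String) (h : t = false → temp = []) (c : List String) :
    collP t temp ("RESULT:" :: c) = collP true temp c := by
  cases t with
  | true => simp [collP]
  | false => simp [collP, h rfl, bCollect_result]

theorem collP_cons_ne (t : Bool) (temp c : List String) (w : String) (hw : w ≠ "RESULT:") :
    collP t temp (w :: c) = (if t then collP t (temp ++ [w]) c else collP t temp c) := by
  cases t with
  | true => simp [collP, hw]
  | false => simp [collP, bCollect_cons_ne w hw]

theorem collP_nil (t : Bool) (temp : List String) (h : t = false → temp = []) :
    collP t temp [] = temp := by
  cases t with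
  | true => simp [collP]
  | false => simp [collP, h rfl, bCollect_nil]

theorem sp_prepend (pre cur l : List String) :
    sp (pre ++ cur) l = (match sp cur l with
      | ([], c) => ([], pre ++ c)
      | (c :: r, cf) => ((pre ++ c) :: r, cf)) := by
  induction l generalizing cur with
  | nil => simp [sp]
  | cons x xs ihl =>
    by_cases hx : x = "STDOUT:"
    · simp [sp, hx]
    · rw [sp_cons_ne x hx, sp_cons_ne x hx, List.append_assoc, ihl]

-- main invariant: A's flushed groups ++ [final temp] equal B's assembly
theorem main_inv (ws : List String) : ∀ (t : Bool) (temp : List String), (t = false → temp = []) →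
    (fA t temp ws).2.2 ++ [(fA t temp ws).2.1] = mix t temp (sp [] ws) := by
  induction ws with
  | nil =>
    intro t temp h
    simp [fA, sp, mix, collP_nil t temp h]
  | cons w ws ih =>
    intro t temp h
    by_cases h1 : w = "RESULT:"
    · subst h1
      have hne : "RESULT:" ≠ "STDOUT:" := by decide
      rw [sp_cons_ne _ hne]
      have hfa : fA t temp ("RESULT:" :: ws) = fA true temp ws := by simp [fA]
      rw [hfa, ih true temp (by simp)]
      have := sp_prepend ["RESULT:"] [] ws
      simp only [List.nil_append, List.append_nil] at this ⊢
      rw [this]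
      cases hq : sp [] ws with
      | mk cs cur =>
        cases cs with
        | nil => simp [mix, collP_result t temp h]
        | cons c r => simp [mix, collP_result t temp h]
    · by_cases h2 : w = "STDOUT:"
      · subst h2
        have hfa : fA t temp ("STDOUT:" :: ws) =
            (if temp ≠ [] then
              ((fA false [] ws).1, (fA false [] ws).2.1, temp :: (fA false [] ws).2.2)
            else fA false [] ws) := by
          simp [fA, h1]
        have hsp : sp [] ("STDOUT:" :: ws) = ([] :: (sp [] ws).1, (sp [] ws).2) := by
          simp [sp]
        rw [hsp]
        have hmix : mix t temp ([] :: (sp [] ws).1, (sp [] ws).2) =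
            (if temp ≠ [] then [temp] else []) ++ mix false [] (sp [] ws) := by
          rw [mix_false_nil]
          have hc : collP t temp [] = temp := collP_nil t temp h
          by_cases htemp : temp = []
          · cases hq : (sp [] ws).1 with
            | nil => cases t <;> simp [mix, htemp, collP, bCollect_nil]
            | cons a b => cases t <;> simp [mix, htemp, collP, bCollect_nil]
          · cases hq : (sp [] ws).1 with
            | nil => simp [mix, hc, htemp]
            | cons x y => simp [mix, hc, List.filter_cons, htemp]
        rw [hmix, ← ih false [] (fun _ => rfl)]
        rw [hfa]
        by_cases h3 : temp = []
        · simp [h3]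
        · simp [h3]
      · -- ordinary word
        rw [sp_cons_ne w h2]
        have hspw := sp_prepend [w] [] ws
        simp only [List.nil_append, List.append_nil] at hspw ⊢
        rw [hspw]
        cases t with
        | true =>
          have hfa : fA true temp (w :: ws) = fA true (temp ++ [w]) ws := by
            simp [fA, h1, h2]
          rw [hfa, ih true (temp ++ [w]) (by simp)]
          cases hq : sp [] ws with
          | mk cs cur =>
            cases cs with
            | nil => simp [mix, collP_cons_ne true temp cur w h1]
            | cons c r => simp [mix, collP_cons_ne true temp c w h1]
        | false =>
          have hfa : fA false temp (w :: ws) = fA false temp ws := by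
            simp [fA, h1, h2]
          rw [hfa, ih false temp h]
          cases hq : sp [] ws with
          | mk cs cur =>
            cases cs with
            | nil => simp [mix, collP_cons_ne false temp cur w h1]
            | cons c r => simp [mix, collP_cons_ne false temp c w h1]

-- ===== VERDICT (by name: the statement is the Claim_ definition above) =====
theorem get_test_output_spec : Claim_equal_get_test_output := by
  intro ws _
  unfold Spec_get_test_output get_test_output get_test_output_alt
  rw [foldl_aStep, foldl_bStep]
  simp only [List.nil_append]
  rw [main_inv ws false [] (fun _ => rfl), mix_false_nil]
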